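-- pv_equiv track=rewrite | github.com/fluiddyn/fluidimage | src/fluidimage/topologies/splitters.py | split_range
-- ===== SOURCE A (Python) =====
-- def split_range(start0, stop0, step0, num_parts):
--     num_elems = len(range(start0, stop0, step0))
--
--     num_elems_per_parts_approx = num_elems // num_parts
--     remainder = num_elems % num_parts
--
--     assert num_elems == num_elems_per_parts_approx * num_parts + remainder
--
--     num_elems_vs_ipart = [num_elems_per_parts_approx] * num_parts
--     for ipart in range(remainder):
--         num_elems_vs_ipart[ipart] += 1
--
--     assert sum(num_elems_vs_ipart) == num_elems
--
--     ranges = []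
--     start = start0
--     for ipart, num_elems_ipart in enumerate(num_elems_vs_ipart):
--         stop = start + num_elems_ipart * step0
--         ranges.append((start, stop, step0))
--         start = stop
--
--     return ranges
-- ===== SOURCE B (Python) =====
-- def split_range(start0, stop0, step0, num_parts):
--     num_elems = len(range(start0, stop0, step0))
--     q, r = divmod(num_elems, num_parts)
--     out = []
--     for i in range(num_parts):
--         out.append((start0 + step0 * (i * q + min(i, r)),
--                     start0 + step0 * ((i + 1) * q + min(i + 1, r)),
--                     step0))
--     return out
-- ===== Notes on version B (the rewrite author's own statement) =====
-- stated objective: simpler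
-- what changed: B replaces A's intermediate per-part counts list, remainder-increment loop and sequential start/stop accumulator with a single loop that computes each sub-range's boundaries in closed form from its index via q = num_elems // num_parts, r = num_elems % num_parts and min(i, r).
import Mathlib
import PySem

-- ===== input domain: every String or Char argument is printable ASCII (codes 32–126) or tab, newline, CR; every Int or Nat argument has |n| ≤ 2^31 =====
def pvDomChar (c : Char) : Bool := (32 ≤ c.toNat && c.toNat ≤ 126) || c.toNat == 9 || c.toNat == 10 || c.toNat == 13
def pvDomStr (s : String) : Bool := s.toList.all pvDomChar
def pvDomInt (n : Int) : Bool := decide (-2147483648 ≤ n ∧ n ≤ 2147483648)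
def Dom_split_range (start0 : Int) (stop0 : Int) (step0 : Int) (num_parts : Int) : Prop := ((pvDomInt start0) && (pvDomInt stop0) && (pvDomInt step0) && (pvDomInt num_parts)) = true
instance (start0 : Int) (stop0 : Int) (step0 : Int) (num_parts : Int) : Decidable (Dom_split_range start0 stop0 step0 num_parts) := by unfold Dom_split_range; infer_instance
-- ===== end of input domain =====

-- B derives each sub-range's boundaries in closed form from its index (q, r and min(i, r))
-- instead of A's intermediate counts list and sequential start/stop accumulator; objective: simpler.

-- ===== PORT A =====
def split_range (start0 : Int) (stop0 : Int) (step0 : Int) (num_parts : Int) : List (Int × Int × Int) :=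
  let num_elems : Int := ((PySem.List.pyRange start0 stop0 step0).length : Int)
  let num_elems_per_parts_approx := PySem.Int.floordiv num_elems num_parts
  let remainder := PySem.Int.mod num_elems num_parts
  let counts0 := List.replicate num_parts.toNat num_elems_per_parts_approx
  let counts := (PySem.List.pyRange 0 remainder 1).foldl
      (fun l i => l.set i.toNat (l.getD i.toNat 0 + 1)) counts0
  ((PySem.List.enumerate counts 0).foldl
      (fun (p : List (Int × Int × Int) × Int) e =>
        (p.1 ++ [(p.2, p.2 + e.2 * step0, step0)], p.2 + e.2 * step0)) ([], start0)).1

-- ===== PORT B =====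
def split_range_alt (start0 : Int) (stop0 : Int) (step0 : Int) (num_parts : Int) : List (Int × Int × Int) :=
  let num_elems : Int := ((PySem.List.pyRange start0 stop0 step0).length : Int)
  let q := PySem.Int.floordiv num_elems num_parts
  let r := PySem.Int.mod num_elems num_parts
  (PySem.List.pyRange 0 num_parts 1).foldl
    (fun out i => out ++ [(start0 + step0 * (i * q + min i r),
                           start0 + step0 * ((i + 1) * q + min (i + 1) r), step0)]) []

-- ===== PRECONDITION & SPEC =====
-- Pre_ excludes exactly the inputs where A raises: step0 = 0 (ValueError from range),
-- num_parts = 0 (ZeroDivisionError), and num_parts < 0 with a non-empty range (AssertionError).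
def Pre_split_range (start0 : Int) (stop0 : Int) (step0 : Int) (num_parts : Int) : Prop :=
  step0 ≠ 0 ∧ (0 < num_parts ∨
    (num_parts < 0 ∧ ((0 < step0 ∧ stop0 ≤ start0) ∨ (step0 < 0 ∧ start0 ≤ stop0))))
instance (start0 : Int) (stop0 : Int) (step0 : Int) (num_parts : Int) : Decidable (Pre_split_range start0 stop0 step0 num_parts) := by unfold Pre_split_range; infer_instance

def pvWitness_split_range : Int × Int × Int × Int := (0, 10, 1, 3)

def Spec_split_range (start0 : Int) (stop0 : Int) (step0 : Int) (num_parts : Int) (out : List (Int × Int × Int)) : Prop := out = split_range_alt start0 stop0 step0 num_parts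
instance (start0 : Int) (stop0 : Int) (step0 : Int) (num_parts : Int) (out : List (Int × Int × Int)) : Decidable (Spec_split_range start0 stop0 step0 num_parts out) := by unfold Spec_split_range; infer_instance

-- ===== CLAIM (what is proved, stated in full; the proofs are below) =====
def Claim_equal_split_range : Prop := ∀ (start0 : Int) (stop0 : Int) (step0 : Int) (num_parts : Int), Dom_split_range start0 stop0 step0 num_parts → Pre_split_range start0 stop0 step0 num_parts → Spec_split_range start0 stop0 step0 num_parts (split_range start0 stop0 step0 num_parts)

-- ===== LEMMAS AND PROOFS =====

-- range(a, b, s) is empty when it counts the wrong way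
lemma pv_pyRange_nil_pos (a b s : Int) (hs : 0 < s) (h : b ≤ a) : PySem.List.pyRange a b s = [] := by
  rw [PySem.List.pyRange_of_pos a b hs]; simp [show ¬ a < b by omega]

lemma pv_pyRange_nil_neg (a b s : Int) (hs : s < 0) (h : a ≤ b) : PySem.List.pyRange a b s = [] := by
  unfold PySem.List.pyRange
  simp [show ¬ (0:Int) < s by omega, show s ≠ 0 by omega, show ¬ b < a by omega]

-- the remainder-increment loop turns [q] * N into its pointwise characterisation
lemma pv_set_map_range (N r : Nat) (_hr : r < N) (q : Int) :
    ((List.range N).map (fun k => if k < r then q + 1 else q)).set r (q + 1)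
      = (List.range N).map (fun k => if k < r + 1 then q + 1 else q) := by
  apply List.ext_getElem
  · simp
  · intro i h1 h2
    rw [List.getElem_set]
    simp only [List.getElem_map, List.getElem_range]
    split_ifs <;> omega

lemma pv_counts (N : Nat) (q : Int) : ∀ (r : Nat), r ≤ N →
    (PySem.List.pyRange 0 (r : Int) 1).foldl
        (fun l i => l.set i.toNat (l.getD i.toNat 0 + 1)) (List.replicate N q)
      = (List.range N).map (fun k => if k < r then q + 1 else q)
  | 0, _ => by
      rw [PySem.List.pyRange_one_eq_nil (by omega)]
      simp [List.foldl_nil, List.map_const']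
  | r + 1, hr => by
      have h1 : ((r + 1 : Nat) : Int) = (r : Int) + 1 := by push_cast; ring
      rw [h1, PySem.List.pyRange_one_succ_right (by positivity), List.foldl_append,
        pv_counts N q r (by omega)]
      simp only [List.foldl_cons, List.foldl_nil, Int.toNat_natCast]
      rw [PySem.List.getD_map_range _ N r 0 (by omega)]
      simp only [show ¬ r < r by omega, if_false]
      exact pv_set_map_range N r (by omega) q

-- A's sequential accumulator loop, with abstract counts cnt and closed-form boundaries s
lemma pv_foldA (step0 start0 : Int) (cnt s : Nat → Int) (h0 : s 0 = start0)
    (hs : ∀ k, s (k + 1) = s k + cnt k * step0) : ∀ (N : Nat),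
    ((List.range N).map cnt).foldl
        (fun (p : List (Int × Int × Int) × Int) c =>
          (p.1 ++ [(p.2, p.2 + c * step0, step0)], p.2 + c * step0)) ([], start0)
      = ((List.range N).map (fun k => (s k, s (k + 1), step0)), s N)
  | 0 => by simp [h0]
  | N + 1 => by
      rw [List.range_succ, List.map_append, List.map_append, List.foldl_append,
        pv_foldA step0 start0 cnt s h0 hs N]
      simp [hs N]

theorem split_range_spec : Claim_equal_split_range := by
  intro start0 stop0 step0 num_parts _ hpre
  obtain ⟨hstep, hcases⟩ := hpre
  unfold Spec_split_range
  simp only [split_range, split_range_alt]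
  rcases hcases with hpos | ⟨hneg, hempty⟩
  · -- num_parts > 0
    set n : Int := ((PySem.List.pyRange start0 stop0 step0).length : Int) with hn
    set q : Int := PySem.Int.floordiv n num_parts with hq
    set r : Int := PySem.Int.mod n num_parts with hrdef
    have hr0 : 0 ≤ r := PySem.Int.mod_nonneg n hpos
    have hrlt : r < num_parts := PySem.Int.mod_lt n hpos
    have hNP : ((num_parts.toNat : Int)) = num_parts := Int.toNat_of_nonneg (by omega)
    have hR : ((r.toNat : Int)) = r := Int.toNat_of_nonneg hr0
    set N : Nat := num_parts.toNat
    -- counts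
    have hcounts := pv_counts N q r.toNat (by omega)
    rw [hR] at hcounts
    rw [hcounts]
    -- A's accumulator loop
    set s : Nat → Int := fun k => start0 + step0 * ((k : Int) * q + min (k : Int) r) with hsdef
    have hs0 : s 0 = start0 := by simp [hsdef, min_eq_left hr0]
    have hsrec : ∀ k, s (k + 1) = s k + (if k < r.toNat then q + 1 else q) * step0 := by
      intro k
      by_cases hk : (k : Int) < r
      · rw [if_pos (by omega)]
        simp only [hsdef]
        rw [min_eq_left (by omega), min_eq_left (by push_cast; omega)]
        push_cast
        ring
      · rw [if_neg (by omega)]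
        simp only [hsdef]
        rw [min_eq_right (by omega), min_eq_right (by omega)]
        push_cast
        ring
    have hA : (PySem.List.enumerate ((List.range N).map fun k => if k < r.toNat then q + 1 else q) 0).foldl
        (fun (p : List (Int × Int × Int) × Int) e =>
          (p.1 ++ [(p.2, p.2 + e.2 * step0, step0)], p.2 + e.2 * step0)) ([], start0)
        = ((List.range N).map fun k => if k < r.toNat then q + 1 else q).foldl
        (fun (p : List (Int × Int × Int) × Int) c =>
          (p.1 ++ [(p.2, p.2 + c * step0, step0)], p.2 + c * step0)) ([], start0) := by
      conv_rhs => rw [← PySem.List.map_snd_enumerate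
        ((List.range N).map fun k => if k < r.toNat then q + 1 else q) 0, List.foldl_map]
    rw [hA, pv_foldA step0 start0 _ s hs0 hsrec N]
    -- B's loop
    rw [PySem.List.foldl_append_singleton_eq_map, List.nil_append,
      PySem.List.pyRange_one 0 num_parts]
    simp only [Int.sub_zero, List.map_map]
    apply List.map_congr_left
    intro k _
    simp only [Function.comp_apply, hsdef]
    push_cast
    norm_num
  · -- num_parts < 0 and the range is empty: both return []
    have hnil : PySem.List.pyRange start0 stop0 step0 = [] := by
      rcases hempty with ⟨h1, h2⟩ | ⟨h1, h2⟩
      · exact pv_pyRange_nil_pos _ _ _ h1 h2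
      · exact pv_pyRange_nil_neg _ _ _ h1 h2
    have hr : PySem.Int.mod ((PySem.List.pyRange start0 stop0 step0).length : Int) num_parts = 0 := by
      rw [hnil]; simp [PySem.Int.mod_eq_zero_iff_dvd]
    simp only [hr]
    rw [PySem.List.pyRange_one_eq_nil (le_refl 0),
      PySem.List.pyRange_one_eq_nil (by omega : num_parts ≤ 0)]
    simp [show num_parts.toNat = 0 by omega]
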